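-- pv_equiv track=rewrite | github.com/joelyuhas/Academic-Code | Academic/Computer Science I/Lab/Lab F/pack.py | unUsed
-- ===== SOURCE A (Python) =====
-- def isSpaceFree( binSize, row, column, block ):
--     """
--     PreConditions: Recives the size of bin, row value, column value, and block size
--     PostConditions: outputs either False if location is not 0, returns true if location is 0
--     """
--     if ((len( binSize ) < block + row) or (len( binSize )) < block + column ):
--         return False
--     for i in range ( row, row +block ):
--         for g in range( column, column + block):
--             if binSize[i][g] != 0:
--                 return False
--     return True
--
-- def placeBlock( block, Bin, row, column):
--     """
--     PreConditions: recives block size, bin size, row and colums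
--     PostConditions: fills designated row and colom areas with number corresponding to size of box
--     """
--     for r in range(row, row+block):
--         for c in range(column, column+block):
--             Bin[r][c] = block
--     return Bin
--
-- def tryPacker( Bin, block ):
--     """
--     PreConditions: recives bin and list of blocks
--     PostConditions: returns ture if block is packed, returns false if block is not packed
--     """
--     for row in range(len(Bin)):
--         for column in range(len(Bin)):
--             if isSpaceFree(Bin, row, column, block ) == True:
--                 placeBlock( block, Bin, row, column)
--                 return True
--     return False
--
-- def unUsed( Bin, blockList):
--     """
--     PreConditions: takes in bin size and list of blocks
--     PostConditions: returns all the blocks that were not useed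
--     """
--     unUsed = []
--     for block in blockList:
--         if tryPacker(Bin, block) == True:
--             pass
--         else:
--             unUsed.append(block)
--     return unUsed
-- ===== SOURCE B (Python) =====
-- # Faster exact re-implementation: per-block 1D row prefix sums of nonzero cells
-- # give an O(b) window-emptiness test instead of A's O(b*b) cell scan, and the
-- # candidate ranges are bounded to n-b+1 up front instead of re-checking bounds per call.
-- # Note: A mutates Bin in place; B works on a private copy (only the return value is claimed equal).
--
-- def _find_spot(grid, n, b):
--     if b > n:
--         return None                 # no offset fits, nothing to scan
--     # pref[i][j] = number of nonzero cells among grid[i][0:j]  (only columns < n matter)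
--     pref = []
--     for row in grid:
--         p = [0]
--         for j in range(n):
--             p.append(p[-1] + (1 if row[j] != 0 else 0))
--         pref.append(p)
--     for r in range(n - b + 1):
--         for c in range(n - b + 1):
--             if all(pref[i][c + b] == pref[i][c] for i in range(r, r + b)):
--                 return (r, c)
--     return None
--
-- def unUsed(Bin, blockList):
--     n = len(Bin)
--     if n == 0:
--         return list(blockList)      # an empty bin has no position for any block
--     grid = [list(row) for row in Bin]
--     leftover = []
--     for b in blockList:
--         if b <= 0:
--             continue                # zero-area block: occupies no cells, trivially placed
--         spot = _find_spot(grid, n, b)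
--         if spot is None:
--             leftover.append(b)
--         else:
--             r, c = spot
--             for i in range(r, r + b):
--                 for j in range(c, c + b):
--                     grid[i][j] = b
--     return leftover
-- ===== Notes on version B (the rewrite author's own statement) =====
-- stated objective: faster
-- what changed: Per block, B builds 1D prefix sums of nonzero cells for each row once and tests a candidate window with b O(1) prefix differences instead of A's b*b cell scan, restricting candidates to the n-b+1 valid offsets up front instead of re-checking bounds inside every isSpaceFree call; B also leaves Bin unmutated, working on a copy.
-- outside the precondition, e.g. on unUsed([[1, 0], [0]], [1]): A returns [], B raises IndexError
import Mathlib
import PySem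

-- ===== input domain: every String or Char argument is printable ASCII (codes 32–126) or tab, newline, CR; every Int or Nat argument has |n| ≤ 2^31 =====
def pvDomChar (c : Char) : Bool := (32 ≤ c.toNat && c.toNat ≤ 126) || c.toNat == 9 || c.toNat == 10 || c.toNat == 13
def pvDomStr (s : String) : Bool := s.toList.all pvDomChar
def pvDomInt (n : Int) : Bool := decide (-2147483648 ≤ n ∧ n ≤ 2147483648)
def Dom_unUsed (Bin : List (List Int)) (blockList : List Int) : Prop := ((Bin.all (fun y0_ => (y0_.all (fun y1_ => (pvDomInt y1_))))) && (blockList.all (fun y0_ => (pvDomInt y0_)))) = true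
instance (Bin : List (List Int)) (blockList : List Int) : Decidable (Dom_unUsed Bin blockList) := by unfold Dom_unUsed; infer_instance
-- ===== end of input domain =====

-- B changes the placement test: 1D row prefix sums of nonzero cells, rebuilt per block,
-- replace A's per-position cell-by-cell scan. A mutates Bin in place; B works on a copy,
-- and only the RETURN value is claimed equal.

-- ===== PORT A =====
def isSpaceFree (binSize : List (List Int)) (row column block : Int) : Bool :=
  if ((binSize.length : Int) < block + row) ∨ ((binSize.length : Int) < block + column) then false
  else
    (PySem.List.pyRange row (row + block) 1).all (fun i =>
      (PySem.List.pyRange column (column + block) 1).all (fun g =>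
        PySem.List.pyGetD (PySem.List.pyGetD binSize i []) g 0 == 0))

def placeBlock (block : Int) (Bin : List (List Int)) (row column : Int) : List (List Int) :=
  (PySem.List.pyRange row (row + block) 1).foldl (fun B r =>
    (PySem.List.pyRange column (column + block) 1).foldl (fun B c =>
      PySem.List.pySetD B r (PySem.List.pySetD (PySem.List.pyGetD B r []) c block)) B) Bin

def tryPacker (Bin : List (List Int)) (block : Int) : Bool × List (List Int) :=
  match ((PySem.List.pyRange 0 (Bin.length : Int) 1).flatMap (fun r =>
           (PySem.List.pyRange 0 (Bin.length : Int) 1).map (fun c => (r, c)))).find?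
          (fun p => isSpaceFree Bin p.1 p.2 block) with
  | some (r, c) => (true, placeBlock block Bin r c)
  | none => (false, Bin)

def unUsed (Bin : List (List Int)) (blockList : List Int) : List Int :=
  (blockList.foldl (fun (st : List (List Int) × List Int) b =>
      let r := tryPacker st.1 b
      if r.1 then (r.2, st.2) else (r.2, st.2 ++ [b])) (Bin, ([] : List Int))).2

-- ===== PORT B =====
def rowPref (row : List Int) (n : Int) : List Int :=
  (PySem.List.pyRange 0 n 1).foldl
    (fun p j => p ++ [p.getLastD 0 + (if PySem.List.pyGetD row j 0 ≠ 0 then 1 else 0)]) [0]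

def findSpot (grid : List (List Int)) (n b : Int) : Option (Int × Int) :=
  if n < b then none
  else
    let pref := grid.map (fun row => rowPref row n)
    ((PySem.List.pyRange 0 (n - b + 1) 1).flatMap (fun r =>
       (PySem.List.pyRange 0 (n - b + 1) 1).map (fun c => (r, c)))).find?
      (fun p => (PySem.List.pyRange p.1 (p.1 + b) 1).all (fun i =>
          PySem.List.pyGetD (PySem.List.pyGetD pref i []) (p.2 + b) 0
            == PySem.List.pyGetD (PySem.List.pyGetD pref i []) p.2 0))

def placeSpot (grid : List (List Int)) (b r c : Int) : List (List Int) :=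
  (PySem.List.pyRange r (r + b) 1).foldl (fun G i =>
    (PySem.List.pyRange c (c + b) 1).foldl (fun G j =>
      PySem.List.pySetD G i (PySem.List.pySetD (PySem.List.pyGetD G i []) j b)) G) grid

def unUsed_alt (Bin : List (List Int)) (blockList : List Int) : List Int :=
  let n : Int := (Bin.length : Int)
  if n = 0 then blockList
  else
    (blockList.foldl (fun (st : List (List Int) × List Int) b =>
        if b ≤ 0 then st
        else
          match findSpot st.1 n b with
          | none => (st.1, st.2 ++ [b])
          | some (r, c) => (placeSpot st.1 b r c, st.2)) (Bin, ([] : List Int))).2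

-- ===== PRECONDITION & SPEC =====
-- Pre_ excludes ragged bins (a row shorter than len(Bin)) when some block could actually be
-- scanned (0 < b ≤ len(Bin)): there A raises IndexError on most inputs, and where a nonzero
-- cell happens to shield the missing one A still returns while B's upfront prefix-sum pass
-- over the first len(Bin) columns of every row raises.
def Pre_unUsed (Bin : List (List Int)) (blockList : List Int) : Prop :=
  (∀ row ∈ Bin, Bin.length ≤ row.length) ∨ (∀ b ∈ blockList, b ≤ 0 ∨ (Bin.length : Int) < b)

instance (Bin : List (List Int)) (blockList : List Int) : Decidable (Pre_unUsed Bin blockList) := by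
  unfold Pre_unUsed; infer_instance

def pvWitness_unUsed : List (List Int) × List Int := ([[0, 0], [3, 0]], [1, 2, 1, -1])

def Spec_unUsed (Bin : List (List Int)) (blockList : List Int) (out : List Int) : Prop :=
  out = unUsed_alt Bin blockList

instance (Bin : List (List Int)) (blockList : List Int) (out : List Int) : Decidable (Spec_unUsed Bin blockList out) := by
  unfold Spec_unUsed; infer_instance

-- ===== CLAIM (what is proved, stated in full; the proofs are below) =====
def Claim_equal_unUsed : Prop := ∀ (Bin : List (List Int)) (blockList : List Int), Dom_unUsed Bin blockList → Pre_unUsed Bin blockList → Spec_unUsed Bin blockList (unUsed Bin blockList)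

-- ===== LEMMAS AND PROOFS =====

-- general helpers (first-match / all congruence over a list)
theorem pvFind?Congr {α : Type} (l : List α) (p q : α → Bool)
    (h : ∀ x ∈ l, p x = q x) : l.find? p = l.find? q := by
  induction l with
  | nil => rfl
  | cons a t ih =>
    simp only [List.find?_cons]
    rw [h a (by simp)]
    cases q a
    · exact ih (fun x hx => h x (by simp [hx]))
    · rfl

theorem pvAllCongr {α : Type} (l : List α) (p q : α → Bool)
    (h : ∀ x ∈ l, p x = q x) : l.all p = l.all q := by
  induction l with
  | nil => rfl
  | cons a t ih =>
    simp only [List.all_cons]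
    rw [h a (by simp), ih (fun x hx => h x (by simp [hx]))]

theorem pvFind?FlatMapCongr {α β : Type} (rows : List α) (f g : α → List β) (p q : β → Bool)
    (h : ∀ r ∈ rows, (f r).find? p = (g r).find? q) :
    ((rows.flatMap f).find? p) = ((rows.flatMap g).find? q) := by
  induction rows with
  | nil => rfl
  | cons a t ih =>
    simp only [List.flatMap_cons, List.find?_append]
    rw [h a (by simp), ih (fun x hx => h x (by simp [hx]))]

-- closed form of B's per-row prefix list
theorem rowPref_closed (row : List Int) :
    ∀ (m : Nat), m ≤ row.length →
      rowPref row (m : Int) =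
        (List.range (m + 1)).map (fun j => (((row.take j).countP (fun x => x != 0) : Nat) : Int)) := by
  intro m
  induction m with
  | zero =>
    intro _
    simp [rowPref, PySem.List.pyRange_one_eq_nil, List.range_one]
  | succ m ih =>
    intro hm
    have hm' : m ≤ row.length := Nat.le_of_succ_le hm
    have hmlt : m < row.length := hm
    unfold rowPref at *
    have hcast : ((m + 1 : Nat) : Int) = (m : Int) + 1 := by push_cast; ring
    rw [hcast, PySem.List.pyRange_one_succ_right (by positivity), List.foldl_append,
        List.foldl_cons, List.foldl_nil, ih hm']
    have hlast : (((List.range (m + 1)).map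
        (fun j => (((row.take j).countP (fun x => x != 0) : Nat) : Int))).getLastD 0)
        = (((row.take m).countP (fun x => x != 0) : Nat) : Int) := by
      rw [List.range_succ, List.map_append]
      exact List.getLastD_concat
    rw [hlast]
    have hget : PySem.List.pyGetD row (m : Int) 0 = row[m] := by
      rw [PySem.List.pyGetD_natCast, List.getD_eq_getElem row 0 hmlt]
    rw [hget]
    have hstep : (((row.take (m + 1)).countP (fun x => x != 0) : Nat) : Int)
        = (((row.take m).countP (fun x => x != 0) : Nat) : Int)
          + (if row[m] ≠ 0 then 1 else 0) := by
      rw [List.take_add_one, List.getElem?_eq_getElem hmlt]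
      simp only [Option.toList_some, List.countP_append, List.countP_cons, List.countP_nil]
      by_cases h0 : row[m] = 0 <;> simp [h0]
    conv_rhs => rw [List.range_succ, List.map_append]
    simp only [List.map_cons, List.map_nil]
    rw [hstep]

theorem rowPref_getD (row : List Int) (N j : Nat) (hj : j ≤ N) (hN : N ≤ row.length) :
    PySem.List.pyGetD (rowPref row (N : Int)) (j : Int) 0
      = (((row.take j).countP (fun x => x != 0) : Nat) : Int) := by
  rw [rowPref_closed row N hN, PySem.List.pyGetD_natCast,
      PySem.List.getD_map_range _ _ _ _ (by omega)]

-- A's inner column scan over one row equals B's prefix-difference test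
theorem count_window_zero (row : List Int) (cn bn : Nat) (hlen : cn + bn ≤ row.length) :
    ((row.take (cn + bn)).countP (fun x => x != 0) = (row.take cn).countP (fun x => x != 0))
      ↔ ∀ k < bn, row.getD (cn + k) 0 = 0 := by
  rw [List.take_add, List.countP_append]
  have hseglen : ((row.drop cn).take bn).length = bn := by
    simp [List.length_take, List.length_drop]; omega
  have hseg : ∀ (k : Nat) (hk : k < bn),
      ((row.drop cn).take bn)[k]'(by omega) = row.getD (cn + k) 0 := by
    intro k hk
    rw [List.getElem_take, List.getElem_drop, List.getD_eq_getElem _ _ (by omega)]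
  constructor
  · intro h k hk
    have hzero : ((row.drop cn).take bn).countP (fun x => x != 0) = 0 := by omega
    have hmem : row.getD (cn + k) 0 ∈ (row.drop cn).take bn := by
      rw [← hseg k hk]
      exact List.getElem_mem (by omega)
    have := List.countP_eq_zero.1 hzero _ hmem
    simpa using this
  · intro h
    have hzero : ((row.drop cn).take bn).countP (fun x => x != 0) = 0 := by
      apply List.countP_eq_zero.2
      intro a ha
      obtain ⟨k, hk, hka⟩ := List.mem_iff_getElem.1 ha
      have hk' : k < bn := by omega
      rw [← hka, hseg k hk']
      simpa using h k hk'
    omega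

theorem window_eq (row : List Int) (N : Nat) (b c : Int)
    (hb : 0 ≤ b) (hc : 0 ≤ c) (hcb : c + b ≤ (N : Int)) (hN : N ≤ row.length) :
    ((PySem.List.pyRange c (c + b) 1).all (fun g => PySem.List.pyGetD row g 0 == 0))
      = (PySem.List.pyGetD (rowPref row (N : Int)) (c + b) 0
          == PySem.List.pyGetD (rowPref row (N : Int)) c 0) := by
  have hcb2 : c + b = ((c.toNat + b.toNat : Nat) : Int) := by omega
  have hc2 : c = ((c.toNat : Nat) : Int) := by omega
  have hrhs : (PySem.List.pyGetD (rowPref row (N : Int)) (c + b) 0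
      == PySem.List.pyGetD (rowPref row (N : Int)) c 0)
      = ((((row.take (c.toNat + b.toNat)).countP (fun x => x != 0) : Nat) : Int)
          == (((row.take c.toNat).countP (fun x => x != 0) : Nat) : Int)) := by
    rw [hcb2, rowPref_getD row N _ (by omega) hN]
    conv_lhs => rw [hc2, rowPref_getD row N _ (by omega) hN]
    norm_num
    have hmax : (max c 0).toNat = c.toNat := by omega
    rw [hmax]
  rw [hrhs, PySem.List.pyRange_one]
  have hlen2 : ((c + b) - c).toNat = b.toNat := by omega
  rw [hlen2, List.all_map]
  rw [Bool.eq_iff_iff]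
  rw [List.all_eq_true]
  have hwin := count_window_zero row c.toNat b.toNat (by omega)
  constructor
  · intro h
    have : ∀ k < b.toNat, row.getD (c.toNat + k) 0 = 0 := by
      intro k hk
      have hm := h k (List.mem_range.2 hk)
      have hcast : c + (k : Int) = ((c.toNat + k : Nat) : Int) := by omega
      simp only [Function.comp, hcast, PySem.List.pyGetD_natCast] at hm
      simpa using hm
    have := hwin.2 this
    simp [this]
  · intro h k hk
    have hk' := List.mem_range.1 hk
    have heq : (((row.take (c.toNat + b.toNat)).countP (fun x => x != 0) : Nat) : Int)
        = (((row.take c.toNat).countP (fun x => x != 0) : Nat) : Int) := by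
      simpa using h
    have := hwin.1 (by exact_mod_cast heq) k hk'
    have hcast : c + (k : Int) = ((c.toNat + k : Nat) : Int) := by omega
    simp only [Function.comp, hcast, PySem.List.pyGetD_natCast]
    simpa using this

-- guard: isSpaceFree is false as soon as the window leaves the bin
theorem isFree_false (G : List (List Int)) (b r c : Int)
    (hout : (G.length : Int) < b + r ∨ (G.length : Int) < b + c) :
    isSpaceFree G r c b = false := by
  unfold isSpaceFree
  rw [if_pos hout]

-- predicate equivalence at an in-bounds position
theorem pred_eq (G : List (List Int)) (N : Nat) (b r c : Int)
    (h1 : G.length = N) (h2 : ∀ row ∈ G, N ≤ row.length)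
    (hb : 0 < b) (hr : 0 ≤ r) (hc : 0 ≤ c)
    (hrb : r + b ≤ (N : Int)) (hcb : c + b ≤ (N : Int)) :
    isSpaceFree G r c b
      = ((PySem.List.pyRange r (r + b) 1).all (fun i =>
          PySem.List.pyGetD (PySem.List.pyGetD (G.map (fun row => rowPref row (N : Int))) i []) (c + b) 0
            == PySem.List.pyGetD (PySem.List.pyGetD (G.map (fun row => rowPref row (N : Int))) i []) c 0)) := by
  have hGl : (G.length : Int) = (N : Int) := by exact_mod_cast congrArg Nat.cast h1
  unfold isSpaceFree
  rw [if_neg (by omega)]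
  apply pvAllCongr
  intro i hi
  have hib := (PySem.List.mem_pyRange_one).1 hi
  have hi0 : 0 ≤ i := by omega
  have hkN : i.toNat < G.length := by omega
  have e1 : PySem.List.pyGetD G i [] = G[i.toNat] := by
    conv_lhs => rw [← Int.toNat_of_nonneg hi0]
    rw [PySem.List.pyGetD_natCast, List.getD_eq_getElem G [] hkN]
  have e2 : PySem.List.pyGetD (G.map (fun row => rowPref row (N : Int))) i []
      = rowPref (G[i.toNat]) (N : Int) := by
    conv_lhs => rw [← Int.toNat_of_nonneg hi0]
    rw [PySem.List.pyGetD_natCast,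
        List.getD_eq_getElem (G.map (fun row => rowPref row (N : Int))) [] (by simpa using hkN)]
    simp
  rw [e1, e2]
  exact window_eq (G[i.toNat]) N b c (by omega) hc hcb (h2 _ (List.getElem_mem hkN))

-- the two row-major scans find the same first position
theorem scan_eq (G : List (List Int)) (N : Nat) (b : Int)
    (h1 : G.length = N) (h2 : ∀ row ∈ G, N ≤ row.length)
    (hb : 0 < b) (hbn : b ≤ (N : Int)) :
    (((PySem.List.pyRange 0 ((G.length : Int)) 1).flatMap (fun r =>
        (PySem.List.pyRange 0 ((G.length : Int)) 1).map (fun c => (r, c)))).find?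
        (fun p => isSpaceFree G p.1 p.2 b))
      = (((PySem.List.pyRange 0 ((N : Int) - b + 1) 1).flatMap (fun r =>
          (PySem.List.pyRange 0 ((N : Int) - b + 1) 1).map (fun c => (r, c)))).find?
          (fun p => (PySem.List.pyRange p.1 (p.1 + b) 1).all (fun i =>
            PySem.List.pyGetD (PySem.List.pyGetD (G.map (fun row => rowPref row (N : Int))) i []) (p.2 + b) 0
              == PySem.List.pyGetD (PySem.List.pyGetD (G.map (fun row => rowPref row (N : Int))) i []) p.2 0))) := by
  have hGl : (G.length : Int) = (N : Int) := by exact_mod_cast congrArg Nat.cast h1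
  rw [hGl]
  rw [PySem.List.pyRange_one_append 0 ((N : Int) - b + 1) (N : Int) (by omega) (by omega)]
  rw [List.flatMap_append, List.find?_append]
  have htail : (((PySem.List.pyRange ((N : Int) - b + 1) (N : Int) 1).flatMap (fun r =>
      (PySem.List.pyRange 0 ((N : Int) - b + 1) 1 ++
        PySem.List.pyRange ((N : Int) - b + 1) (N : Int) 1).map (fun c => (r, c)))).find?
      (fun p => isSpaceFree G p.1 p.2 b)) = none := by
    rw [List.find?_eq_none]
    intro p hp
    obtain ⟨r, hr, hp⟩ := List.mem_flatMap.1 hp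
    obtain ⟨c, _, rfl⟩ := List.mem_map.1 hp
    have hr' := (PySem.List.mem_pyRange_one).1 hr
    rw [isFree_false G b r c (by omega)]
    simp
  rw [htail, Option.or_none]
  apply pvFind?FlatMapCongr
  intro r hrmem
  have hrb := (PySem.List.mem_pyRange_one).1 hrmem
  rw [List.map_append, List.find?_append]
  have htail2 : (((PySem.List.pyRange ((N : Int) - b + 1) (N : Int) 1).map
      (fun c => (r, c))).find? (fun p => isSpaceFree G p.1 p.2 b)) = none := by
    rw [List.find?_eq_none]
    intro p hp
    obtain ⟨c, hc, rfl⟩ := List.mem_map.1 hp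
    have hc' := (PySem.List.mem_pyRange_one).1 hc
    rw [isFree_false G b r c (by omega)]
    simp
  rw [htail2, Option.or_none]
  apply pvFind?Congr
  intro p hp
  obtain ⟨c, hc, rfl⟩ := List.mem_map.1 hp
  have hcb := (PySem.List.mem_pyRange_one).1 hc
  exact pred_eq G N b r c h1 h2 hb (by omega) (by omega) (by omega) (by omega)

-- the two placement loops are the same fold
theorem placeSpot_eq (G : List (List Int)) (b r c : Int) :
    placeSpot G b r c = placeBlock b G r c := rfl

-- placement never changes the shape of the grid
theorem setcell_mapLen (G : List (List Int)) (i j v : Int) (hi : 0 ≤ i) :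
    (PySem.List.pySetD G i (PySem.List.pySetD (PySem.List.pyGetD G i []) j v)).map List.length
      = G.map List.length := by
  rw [PySem.List.pySetD_of_nonneg _ _ hi]
  by_cases h : i.toNat < G.length
  · rw [List.map_set]
    have hrow : PySem.List.pyGetD G i [] = G[i.toNat] := by
      conv_lhs => rw [← Int.toNat_of_nonneg hi]
      rw [PySem.List.pyGetD_natCast, List.getD_eq_getElem G [] h]
    rw [hrow, PySem.List.length_pySetD]
    have : G[i.toNat].length = (G.map List.length)[i.toNat]'(by simpa using h) := by simp
    rw [this, List.set_getElem_self]
  · rw [List.set_eq_of_length_le (by omega)]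

theorem fold_setcell_mapLen (cols : List Int) (i v : Int) (hi : 0 ≤ i) :
    ∀ G : List (List Int),
      ((cols.foldl (fun B j =>
          PySem.List.pySetD B i (PySem.List.pySetD (PySem.List.pyGetD B i []) j v)) G).map List.length)
        = G.map List.length := by
  induction cols with
  | nil => intro G; rfl
  | cons j t ih =>
    intro G
    rw [List.foldl_cons, ih, setcell_mapLen G i j v hi]

theorem fold_rows_mapLen (rows : List Int) (cols : List Int) (v : Int)
    (hrows : ∀ x ∈ rows, 0 ≤ x) :
    ∀ G : List (List Int),
      ((rows.foldl (fun B i => cols.foldl (fun B j =>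
          PySem.List.pySetD B i (PySem.List.pySetD (PySem.List.pyGetD B i []) j v)) B) G).map List.length)
        = G.map List.length := by
  induction rows with
  | nil => intro G; rfl
  | cons i t ih =>
    intro G
    rw [List.foldl_cons, ih (fun x hx => hrows x (by simp [hx])),
        fold_setcell_mapLen cols i v (hrows i (by simp)) G]

theorem place_mapLen (b r c : Int) (hr : 0 ≤ r) (G : List (List Int)) :
    (placeBlock b G r c).map List.length = G.map List.length := by
  unfold placeBlock
  exact fold_rows_mapLen _ _ _ (by
    intro x hx
    have := (PySem.List.mem_pyRange_one).1 hx
    omega) G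

-- a nonpositive block is "placed" at (0,0) without touching the grid
theorem tryPacker_nonpos (G : List (List Int)) (b : Int) (hb : b ≤ 0) (hG : 0 < G.length) :
    tryPacker G b = (true, G) := by
  have hfree : isSpaceFree G 0 0 b = true := by
    unfold isSpaceFree
    rw [if_neg (by omega), PySem.List.pyRange_one_eq_nil (by omega)]
    rfl
  have hplace : placeBlock b G 0 0 = G := by
    unfold placeBlock
    rw [PySem.List.pyRange_one_eq_nil (by omega)]
    rfl
  unfold tryPacker
  rw [PySem.List.pyRange_one_cons (by exact_mod_cast hG)]
  simp only [List.flatMap_cons, List.map_cons, List.cons_append, List.find?_cons]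
  rw [hfree]
  simp [hplace]

theorem tryPacker_empty (G : List (List Int)) (b : Int) (hG : G.length = 0) :
    tryPacker G b = (false, G) := by
  unfold tryPacker
  rw [hG]
  simp [PySem.List.pyRange_one_eq_nil]

-- A on an empty bin leaves every block unplaced
theorem foldA_empty (G : List (List Int)) (hG : G.length = 0) :
    ∀ (bl acc : List Int),
      ((bl.foldl (fun (st : List (List Int) × List Int) b =>
          let r := tryPacker st.1 b
          if r.1 then (r.2, st.2) else (r.2, st.2 ++ [b])) (G, acc)).2) = acc ++ bl := by
  intro bl
  induction bl with
  | nil => intro acc; simp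
  | cons b t ih =>
    intro acc
    simp only [List.foldl_cons, tryPacker_empty G b hG, if_neg (by simp : ¬ (false = true))]
    rw [ih (acc ++ [b])]
    simp

-- main loop invariant: both folds carry equal state
theorem fold_eq (N : Nat) (hN : 0 < N) :
    ∀ (bl : List Int) (G : List (List Int)) (acc : List Int),
      G.length = N → (∀ row ∈ G, N ≤ row.length) →
      ((bl.foldl (fun (st : List (List Int) × List Int) b =>
          let r := tryPacker st.1 b
          if r.1 then (r.2, st.2) else (r.2, st.2 ++ [b])) (G, acc)).2)
        = ((bl.foldl (fun (st : List (List Int) × List Int) b =>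
            if b ≤ 0 then st
            else
              match findSpot st.1 (N : Int) b with
              | none => (st.1, st.2 ++ [b])
              | some (r, c) => (placeSpot st.1 b r c, st.2)) (G, acc)).2) := by
  intro bl
  induction bl with
  | nil => intro G acc _ _; rfl
  | cons b t ih =>
    intro G acc h1 h2
    by_cases hb : b <= 0
    · have h0 : tryPacker G b = (true, G) := tryPacker_nonpos G b hb (by omega)
      simp only [List.foldl_cons, h0, if_pos hb, if_true]
      exact ih G acc h1 h2
    · by_cases hbn : (N : Int) < b
      · have hA : tryPacker G b = (false, G) := by
          unfold tryPacker
          rw [List.find?_eq_none.mpr]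
          intro p hp
          obtain ⟨r, hr, hp⟩ := List.mem_flatMap.1 hp
          obtain ⟨c, hc, rfl⟩ := List.mem_map.1 hp
          have hr' := (PySem.List.mem_pyRange_one).1 hr
          rw [isFree_false G b r c (by omega)]
          simp
        have hB : findSpot G (N : Int) b = none := by
          unfold findSpot
          rw [if_pos hbn]
        simp only [List.foldl_cons, hA, hB, if_neg hb, Bool.false_eq_true, if_false]
        exact ih G (acc ++ [b]) h1 h2
      · have hscan := scan_eq G N b h1 h2 (by omega) (by omega)
        have hBdef : findSpot G (N : Int) b
            = (((PySem.List.pyRange 0 ((N : Int) - b + 1) 1).flatMap (fun r =>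
                (PySem.List.pyRange 0 ((N : Int) - b + 1) 1).map (fun c => (r, c)))).find?
                (fun p => (PySem.List.pyRange p.1 (p.1 + b) 1).all (fun i =>
                  PySem.List.pyGetD (PySem.List.pyGetD (G.map (fun row => rowPref row (N : Int))) i []) (p.2 + b) 0
                    == PySem.List.pyGetD (PySem.List.pyGetD (G.map (fun row => rowPref row (N : Int))) i []) p.2 0))) := by
          unfold findSpot
          rw [if_neg (by omega)]
        cases hfind : findSpot G (N : Int) b with
        | none =>
          have hA : tryPacker G b = (false, G) := by
            unfold tryPacker
            rw [hscan, ← hBdef, hfind]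
          simp only [List.foldl_cons, hA, hfind, if_neg hb, Bool.false_eq_true, if_false]
          exact ih G (acc ++ [b]) h1 h2
        | some rc =>
          obtain ⟨r, c⟩ := rc
          have hA : tryPacker G b = (true, placeBlock b G r c) := by
            unfold tryPacker
            rw [hscan, ← hBdef, hfind]
          have hfind2 : (((PySem.List.pyRange 0 ((N : Int) - b + 1) 1).flatMap (fun r =>
                (PySem.List.pyRange 0 ((N : Int) - b + 1) 1).map (fun c => (r, c)))).find?
                (fun p => (PySem.List.pyRange p.1 (p.1 + b) 1).all (fun i =>
                  PySem.List.pyGetD (PySem.List.pyGetD (G.map (fun row => rowPref row (N : Int))) i []) (p.2 + b) 0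
                    == PySem.List.pyGetD (PySem.List.pyGetD (G.map (fun row => rowPref row (N : Int))) i []) p.2 0)))
              = some (r, c) := by rw [← hBdef]; exact hfind
          have hmem := List.mem_of_find?_eq_some hfind2
          obtain ⟨r2, hr, hmem⟩ := List.mem_flatMap.1 hmem
          obtain ⟨c2, hc, heq⟩ := List.mem_map.1 hmem
          injection heq with e1 e2
          rw [e1] at hr
          have hr' := (PySem.List.mem_pyRange_one).1 hr
          have hmap := place_mapLen b r c (by omega) G
          have hlen : (placeBlock b G r c).length = N := by
            have := congrArg List.length hmap
            simpa [h1] using this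
          have hrows : ∀ row ∈ placeBlock b G r c, N ≤ row.length := by
            intro row hrow
            have hmem2 : row.length ∈ (placeBlock b G r c).map List.length :=
              List.mem_map_of_mem hrow
            rw [hmap] at hmem2
            obtain ⟨row2, hrow2, hlenEq⟩ := List.mem_map.1 hmem2
            rw [← hlenEq]
            exact h2 row2 hrow2
          simp only [List.foldl_cons, hA, hfind, if_neg hb, placeSpot_eq, if_true]
          exact ih (placeBlock b G r c) acc hlen hrows

-- on a bin where every block is nonpositive or too large, no cell is ever read:
-- both loops agree whatever the row lengths are
theorem fold_triv (N : Nat) (hN : 0 < N) :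
    ∀ (bl : List Int) (G : List (List Int)) (acc : List Int),
      G.length = N → (∀ b ∈ bl, b ≤ 0 ∨ (N : Int) < b) →
      ((bl.foldl (fun (st : List (List Int) × List Int) b =>
          let r := tryPacker st.1 b
          if r.1 then (r.2, st.2) else (r.2, st.2 ++ [b])) (G, acc)).2)
        = ((bl.foldl (fun (st : List (List Int) × List Int) b =>
            if b ≤ 0 then st
            else
              match findSpot st.1 (N : Int) b with
              | none => (st.1, st.2 ++ [b])
              | some (r, c) => (placeSpot st.1 b r c, st.2)) (G, acc)).2) := by
  intro bl
  induction bl with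
  | nil => intro G acc _ _; rfl
  | cons b t ih =>
    intro G acc h1 htriv
    have hrest : ∀ b ∈ t, b ≤ 0 ∨ (N : Int) < b := fun x hx => htriv x (by simp [hx])
    rcases htriv b (by simp) with hb | hbn
    · have h0 : tryPacker G b = (true, G) := tryPacker_nonpos G b hb (by omega)
      simp only [List.foldl_cons, h0, if_pos hb, if_true]
      exact ih G acc h1 hrest
    · have hA : tryPacker G b = (false, G) := by
        unfold tryPacker
        rw [List.find?_eq_none.mpr]
        intro p hp
        obtain ⟨r, hr, hp⟩ := List.mem_flatMap.1 hp
        obtain ⟨c, hc, rfl⟩ := List.mem_map.1 hp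
        have hr' := (PySem.List.mem_pyRange_one).1 hr
        rw [isFree_false G b r c (by omega)]
        simp
      have hB : findSpot G (N : Int) b = none := by
        unfold findSpot
        rw [if_pos hbn]
      simp only [List.foldl_cons, hA, hB, if_neg (show ¬ b ≤ 0 by omega),
        Bool.false_eq_true, if_false]
      exact ih G (acc ++ [b]) h1 hrest

-- ===== VERDICT (by name: the statement is the Claim_ definition above) =====
theorem unUsed_spec : Claim_equal_unUsed := by
  intro Bin blockList _ hpre
  unfold Spec_unUsed unUsed unUsed_alt
  by_cases hN : Bin.length = 0
  · rw [if_pos (by exact_mod_cast hN)]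
    rw [foldA_empty Bin hN blockList []]
    simp
  · rw [if_neg (by exact_mod_cast hN)]
    rcases hpre with hrect | htriv
    · exact fold_eq Bin.length (Nat.pos_of_ne_zero hN) blockList Bin [] rfl hrect
    · exact fold_triv Bin.length (Nat.pos_of_ne_zero hN) blockList Bin [] rfl htriv
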